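-- pv_equiv track=rewrite | github.com/ajmedeio/algos | 2021-brightest-position-on-street/2021. Brightest Position on Street.py | brightestPosition
-- ===== SOURCE A (Python) =====
-- from typing import List
--
-- from collections import OrderedDict
--
-- def brightestPosition(L: List[List[int]]) -> int:
--     """Return the left most position with max brightness"""
--     n = len(L)
--     B = OrderedDict()
--     for p, r in L:
--         B[p-r] = B[p-r] + 1 if p-r in B else 1
--         B[p+r+1] = B[p+r+1] - 1 if p+r+1 in B else -1
--     pre_sum = 0
--     max_p = 0
--     max_b = 0
--     for p in sorted(B.keys()):
--         pre_sum += B[p]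
--         if pre_sum > max_b:
--             max_b = pre_sum
--             max_p = p
--     return max_p
-- ===== SOURCE B (Python) =====
-- def brightestPosition(L):
--     """Return the left most position with max brightness"""
--     # candidate positions: every coordinate where brightness can change
--     points = sorted({p - r for p, r in L} | {p + r + 1 for p, r in L})
--     max_b = 0
--     max_p = 0
--     for c in points:
--         # brightness at c = lamps whose range started at or before c
--         #                   minus lamps whose range ended before c
--         b = sum((p - r <= c) - (p + r + 1 <= c) for p, r in L)
--         if b > max_b:
--             max_b = b
--             max_p = c
--     return max_p
-- ===== Notes on version B (the rewrite author's own statement) =====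
-- stated objective: alternative
-- what changed: Replaces the delta-dict with running prefix sum by a direct brute-force recount: collect the sorted set of event coordinates and, for each candidate, count started-minus-ended lamps from scratch, keeping the leftmost strict maximum.
import Mathlib
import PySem

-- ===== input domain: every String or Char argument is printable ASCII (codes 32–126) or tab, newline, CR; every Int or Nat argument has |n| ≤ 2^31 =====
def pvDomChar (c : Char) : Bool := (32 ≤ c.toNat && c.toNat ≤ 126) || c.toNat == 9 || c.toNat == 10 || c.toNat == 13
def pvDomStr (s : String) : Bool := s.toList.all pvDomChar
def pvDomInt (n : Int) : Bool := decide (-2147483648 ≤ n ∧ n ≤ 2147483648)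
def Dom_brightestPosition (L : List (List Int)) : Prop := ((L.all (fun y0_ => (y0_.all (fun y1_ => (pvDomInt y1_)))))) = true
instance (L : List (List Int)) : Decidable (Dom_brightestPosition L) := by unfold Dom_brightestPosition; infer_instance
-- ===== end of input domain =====

-- B replaces A's delta-dict + running prefix sum by a brute-force recount per sorted
-- event coordinate (alternative decomposition, not faster).


-- ===== PORT A =====
-- the body of A's first loop: record +1 at p-r and -1 at p+r+1 in the ordered dict
def pvStepA (d : PySem.Dict Int Int) (row : List Int) : PySem.Dict Int Int :=
  match row with
  | [p, r] =>
    let d := if d.contains (p - r) then d.insert (p - r) (d.getD (p - r) 0 + 1)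
             else d.insert (p - r) 1
    if d.contains (p + r + 1) then d.insert (p + r + 1) (d.getD (p + r + 1) 0 - 1)
    else d.insert (p + r + 1) (-1)
  | _ => d   -- Python raises ValueError on such a row; excluded by Pre_

def brightestPosition (L : List (List Int)) : Int :=
  -- dict of coordinate deltas; B[p] in the scan is read with getD (the key is always present)
  let B := L.foldl pvStepA PySem.Dict.empty
  let st := (PySem.List.sorted B.keys (fun x => x) false).foldl
    (fun (st : Int × Int × Int) p =>
      let pre_sum := st.1 + B.getD p 0
      if pre_sum > st.2.2 then (pre_sum, p, pre_sum) else (pre_sum, st.2.1, st.2.2))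
    (0, 0, 0)
  st.2.1

-- ===== PORT B =====
def brightestPosition_alt (L : List (List Int)) : Int :=
  let points := PySem.List.sorted
    (PySem.Set.union
      (PySem.Set.ofList (L.map (fun row => match row with | [p, r] => p - r | _ => 0)))
      (PySem.Set.ofList (L.map (fun row => match row with | [p, r] => p + r + 1 | _ => 0))))
    (fun x => x) false
  let res := points.foldl (fun (st : Int × Int) c =>
    let b := L.foldl (fun (s : Int) row =>
      match row with
      | [p, r] => s + ((if p - r ≤ c then (1 : Int) else 0) - (if p + r + 1 ≤ c then (1 : Int) else 0))
      | _ => s) 0   -- Python raises ValueError on such a row; excluded by Pre_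
    if b > st.1 then (b, c) else st) (0, 0)
  res.2

-- ===== PRECONDITION & SPEC =====
-- Pre_ excludes exactly the inputs on which A raises ValueError: a row that is not a pair [p, r].
def Pre_brightestPosition (L : List (List Int)) : Prop := ∀ row ∈ L, row.length = 2
instance (L : List (List Int)) : Decidable (Pre_brightestPosition L) := by unfold Pre_brightestPosition; infer_instance
def pvWitness_brightestPosition : List (List Int) := [[0, 1], [2, 1]]
def Spec_brightestPosition (L : List (List Int)) (out : Int) : Prop := out = brightestPosition_alt L
instance (L : List (List Int)) (out : Int) : Decidable (Spec_brightestPosition L out) := by unfold Spec_brightestPosition; infer_instance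

-- ===== CLAIM (what is proved, stated in full; the proofs are below) =====
def Claim_equal_brightestPosition : Prop := ∀ (L : List (List Int)), Dom_brightestPosition L → Pre_brightestPosition L → Spec_brightestPosition L (brightestPosition L)

-- ===== LEMMAS AND PROOFS =====

-- start / end event coordinate of a row, its brightness delta at c, and its point mass at k
def pvStart (row : List Int) : Int := match row with | [p, r] => p - r | _ => 0
def pvEnd (row : List Int) : Int := match row with | [p, r] => p + r + 1 | _ => 0
def pvDelta (row : List Int) (c : Int) : Int :=
  (if pvStart row ≤ c then 1 else 0) - (if pvEnd row ≤ c then 1 else 0)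
def pvPoint (row : List Int) (k : Int) : Int :=
  (if pvStart row = k then 1 else 0) + (if pvEnd row = k then -1 else 0)
-- total brightness at coordinate c
def pvG (L : List (List Int)) (c : Int) : Int := (L.map (fun row => pvDelta row c)).sum

theorem pv_map_add_sum {α : Type} (L : List α) (f g : α → Int) :
    (L.map (fun l => f l + g l)).sum = (L.map f).sum + (L.map g).sum := by
  induction L with
  | nil => simp
  | cons a t ih => simp [ih]; ring

theorem pv_sum_swap (F : List Int) (L : List (List Int)) (pt : List Int → Int → Int) :
    (F.map (fun k => (L.map (fun l => pt l k)).sum)).sum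
      = (L.map (fun l => (F.map (fun k => pt l k)).sum)).sum := by
  induction F with
  | nil => simp
  | cons k F' ih =>
    simp only [List.map_cons, List.sum_cons, ih]
    rw [← pv_map_add_sum]

theorem pv_indicator_sum (F : List Int) (a x : Int) :
    F.Nodup → (F.map (fun k => if a = k then x else 0)).sum = if a ∈ F then x else 0 := by
  induction F with
  | nil => intro _; simp
  | cons b t ih =>
    intro h
    simp only [List.nodup_cons] at h
    by_cases hab : a = b
    · subst hab
      have ht : (t.map (fun k => if a = k then x else 0)).sum = 0 := by
        rw [ih h.2]; simp [h.1]
      simp [ht]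
    · simp [hab, ih h.2]

theorem pv_stepA_eq (d : PySem.Dict Int Int) (p r : Int) :
    pvStepA d [p, r] = (d.insert (p - r) (d.getD (p - r) 0 + 1)).insert (p + r + 1)
      ((d.insert (p - r) (d.getD (p - r) 0 + 1)).getD (p + r + 1) 0 - 1) := by
  have h1 : (if d.contains (p - r) then d.insert (p - r) (d.getD (p - r) 0 + 1)
             else d.insert (p - r) 1) = d.insert (p - r) (d.getD (p - r) 0 + 1) := by
    by_cases hc : d.contains (p - r)
    · simp [hc]
    · have h0 := PySem.Dict.getD_of_not_contains d (k := p - r) 0 (by simpa using hc)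
      simp [hc, h0]
  have h2 : ∀ d' : PySem.Dict Int Int,
      (if d'.contains (p + r + 1) then d'.insert (p + r + 1) (d'.getD (p + r + 1) 0 - 1)
       else d'.insert (p + r + 1) (-1)) = d'.insert (p + r + 1) (d'.getD (p + r + 1) 0 - 1) := by
    intro d'
    by_cases hc : d'.contains (p + r + 1)
    · simp [hc]
    · have h0 := PySem.Dict.getD_of_not_contains d' (k := p + r + 1) 0 (by simpa using hc)
      simp [hc, h0]
  simp only [pvStepA]
  rw [h1, h2 (d.insert (p - r) (d.getD (p - r) 0 + 1))]

theorem pv_stepA_getD (d : PySem.Dict Int Int) (row : List Int) (c : Int) :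
    (pvStepA d row).getD c 0 = d.getD c 0 + pvPoint row c := by
  match row with
  | [] => by_cases h : (0 : Int) = c <;> simp [pvStepA, pvPoint, pvStart, pvEnd, h]
  | [p] => by_cases h : (0 : Int) = c <;> simp [pvStepA, pvPoint, pvStart, pvEnd, h]
  | p :: r :: x :: xs => by_cases h : (0 : Int) = c <;> simp [pvStepA, pvPoint, pvStart, pvEnd, h]
  | [p, r] =>
    have hne : p - r ≠ p + r + 1 := by omega
    have hne' : (p + r + 1) ≠ (p - r) := by omega
    rw [pv_stepA_eq]
    simp only [PySem.Dict.getD_insert, if_neg hne']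
    by_cases hce : c = p + r + 1
    · subst hce
      simp [pvPoint, pvStart, pvEnd, hne]; omega
    · by_cases hcs : c = p - r
      · subst hcs
        have hx : ¬ (p + r + 1 = p - r) := hne'
        simp [hce, pvPoint, pvStart, pvEnd, hx]
      · have hx1 : ¬ (p - r = c) := fun h => hcs h.symm
        have hx2 : ¬ (p + r + 1 = c) := fun h => hce h.symm
        simp [hce, hcs, pvPoint, pvStart, pvEnd, hx1, hx2]

theorem pv_dict_getD (L : List (List Int)) (d : PySem.Dict Int Int) (c : Int) :
    (L.foldl pvStepA d).getD c 0 = d.getD c 0 + (L.map (fun row => pvPoint row c)).sum := by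
  induction L generalizing d with
  | nil => simp
  | cons a t ih =>
    simp only [List.foldl_cons, List.map_cons, List.sum_cons, ih, pv_stepA_getD]
    ring

theorem pv_stepA_mem_keys (d : PySem.Dict Int Int) (row : List Int) (c : Int)
    (h2 : row.length = 2) :
    c ∈ (pvStepA d row).keys ↔ c = pvStart row ∨ c = pvEnd row ∨ c ∈ d.keys := by
  match row with
  | [p, r] =>
    rw [pv_stepA_eq]
    simp only [PySem.Dict.mem_keys_insert, pvStart, pvEnd]
    tauto

theorem pv_stepA_nodup (d : PySem.Dict Int Int) (row : List Int) (h : d.keys.Nodup) :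
    (pvStepA d row).keys.Nodup := by
  match row with
  | [] => exact h
  | [p] => exact h
  | p :: r :: x :: xs => exact h
  | [p, r] =>
    rw [pv_stepA_eq]
    exact PySem.Dict.nodup_keys_insert _ _ _ (PySem.Dict.nodup_keys_insert _ _ _ h)

theorem pv_dict_mem_keys (L : List (List Int)) (d : PySem.Dict Int Int) (c : Int)
    (hPre : ∀ row ∈ L, row.length = 2) :
    c ∈ (L.foldl pvStepA d).keys ↔ c ∈ d.keys ∨ ∃ row ∈ L, c = pvStart row ∨ c = pvEnd row := by
  induction L generalizing d with
  | nil => simp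
  | cons a t ih =>
    have ha := hPre a (by simp)
    simp only [List.foldl_cons]
    rw [ih _ (fun r hr => hPre r (by simp [hr]))]
    rw [pv_stepA_mem_keys d a c ha]
    constructor
    · rintro ((h | h | hC) | ⟨row, hrow, hc⟩)
      · exact Or.inr ⟨a, by simp, Or.inl h⟩
      · exact Or.inr ⟨a, by simp, Or.inr h⟩
      · exact Or.inl hC
      · exact Or.inr ⟨row, by simp [hrow], hc⟩
    · rintro (h | ⟨row, hrow, hc⟩)
      · exact Or.inl (Or.inr (Or.inr h))
      · rcases List.mem_cons.mp hrow with rfl | hrow'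
        · rcases hc with hc | hc
          · exact Or.inl (Or.inl hc)
          · exact Or.inl (Or.inr (Or.inl hc))
        · exact Or.inr ⟨row, hrow', hc⟩

theorem pv_dict_nodup (L : List (List Int)) (d : PySem.Dict Int Int) (h : d.keys.Nodup) :
    (L.foldl pvStepA d).keys.Nodup := by
  induction L generalizing d with
  | nil => exact h
  | cons a t ih => exact ih _ (pv_stepA_nodup d a h)

theorem pv_scan (v h : Int → Int) :
    ∀ (ks : List Int) (s mb mp : Int),
    (∀ pre c post, ks = pre ++ c :: post → s + ((pre.map v).sum + v c) = h c) →
    (ks.foldl (fun (st : Int × Int × Int) p =>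
        let pre_sum := st.1 + v p
        if pre_sum > st.2.2 then (pre_sum, p, pre_sum) else (pre_sum, st.2.1, st.2.2))
      (s, mp, mb)).2.1
    = (ks.foldl (fun (st : Int × Int) c => if h c > st.1 then (h c, c) else st) (mb, mp)).2 := by
  intro ks
  induction ks with
  | nil => intro s mb mp _; rfl
  | cons c ks' ih =>
    intro s mb mp H
    have hc : s + v c = h c := by
      have := H [] c ks' rfl
      simpa using this
    have Hnext : ∀ pre c' post, ks' = pre ++ c' :: post →
        (h c) + ((pre.map v).sum + v c') = h c' := by
      intro pre c' post hsplit
      have := H (c :: pre) c' post (by simp [hsplit])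
      simp only [List.map_cons, List.sum_cons] at this
      linarith [hc]
    simp only [List.foldl_cons]
    rw [show s + v c = h c from hc]
    by_cases hgt : h c > mb
    · simp only [hgt, if_pos]
      exact ih (h c) (h c) c Hnext
    · simp only [hgt, if_false]
      exact ih (h c) mb mp Hnext

theorem pv_filter_le (ks : List Int) (pre post : List Int) (c : Int)
    (hs : ks.Pairwise (· < ·)) (hsplit : ks = pre ++ c :: post) :
    ks.filter (fun k => decide (k ≤ c)) = pre ++ [c] := by
  subst hsplit
  rw [List.pairwise_append] at hs
  obtain ⟨-, hcp, hcross⟩ := hs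
  rw [List.pairwise_cons] at hcp
  rw [List.filter_append]
  have h1 : pre.filter (fun k => decide (k ≤ c)) = pre := by
    rw [List.filter_eq_self]
    intro a ha
    have := hcross a ha c (by simp)
    simp; omega
  have h2 : (c :: post).filter (fun k => decide (k ≤ c)) = [c] := by
    simp only [List.filter_cons]
    have h3 : post.filter (fun k => decide (k ≤ c)) = [] := by
      rw [List.filter_eq_nil_iff]
      intro a ha
      have := hcp.1 a ha
      simp; omega
    simp [h3]
  rw [h1, h2]

theorem pv_prefix_sum (L : List (List Int)) (ks : List Int) (hnd : ks.Nodup)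
    (hmem : ∀ k, k ∈ ks ↔ ∃ row ∈ L, k = pvStart row ∨ k = pvEnd row) (c : Int) :
    ((ks.filter (fun k => decide (k ≤ c))).map
        (fun k => (L.foldl pvStepA PySem.Dict.empty).getD k 0)).sum = pvG L c := by
  have hF : ∀ F : List Int, F.Nodup → (∀ k, k ∈ F ↔ k ∈ ks ∧ k ≤ c) →
      (F.map (fun k => (L.foldl pvStepA PySem.Dict.empty).getD k 0)).sum = pvG L c := by
    intro F hFnd hFmem
    have h1 : (F.map (fun k => (L.foldl pvStepA PySem.Dict.empty).getD k 0)).sum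
        = (F.map (fun k => (L.map (fun row => pvPoint row k)).sum)).sum := by
      congr 1
      apply List.map_congr_left
      intro k _
      rw [pv_dict_getD, PySem.Dict.getD_empty]
      ring
    rw [h1, pv_sum_swap]
    unfold pvG
    congr 1
    apply List.map_congr_left
    intro row hrow
    have hsplit : (F.map (fun k => pvPoint row k)).sum
        = (F.map (fun k => if pvStart row = k then (1:Int) else 0)).sum
          + (F.map (fun k => if pvEnd row = k then (-1:Int) else 0)).sum := by
      rw [← pv_map_add_sum]
      rfl
    rw [hsplit, pv_indicator_sum F _ _ hFnd, pv_indicator_sum F _ _ hFnd]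
    have hs : pvStart row ∈ F ↔ pvStart row ≤ c := by
      rw [hFmem, hmem]
      constructor
      · exact fun h => h.2
      · exact fun h => ⟨⟨row, hrow, Or.inl rfl⟩, h⟩
    have he : pvEnd row ∈ F ↔ pvEnd row ≤ c := by
      rw [hFmem, hmem]
      constructor
      · exact fun h => h.2
      · exact fun h => ⟨⟨row, hrow, Or.inr rfl⟩, h⟩
    unfold pvDelta
    by_cases hb1 : pvStart row ≤ c <;> by_cases hb2 : pvEnd row ≤ c
    · simp [hs.mpr hb1, he.mpr hb2, hb1, hb2]
    · have n2 : pvEnd row ∉ F := fun h => hb2 (he.mp h)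
      simp [hs.mpr hb1, n2, hb1, hb2]
    · have n1 : pvStart row ∉ F := fun h => hb1 (hs.mp h)
      simp [n1, he.mpr hb2, hb1, hb2]
    · have n1 : pvStart row ∉ F := fun h => hb1 (hs.mp h)
      have n2 : pvEnd row ∉ F := fun h => hb2 (he.mp h)
      simp [n1, n2, hb1, hb2]
  apply hF
  · exact hnd.filter _
  · intro k
    simp [List.mem_filter]
theorem pv_altBright (L : List (List Int)) (c : Int) : ∀ (s : Int),
    L.foldl (fun (s : Int) row =>
      match row with
      | [p, r] => s + ((if p - r ≤ c then (1 : Int) else 0) - (if p + r + 1 ≤ c then (1 : Int) else 0))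
      | _ => s) s = s + pvG L c := by
  induction L with
  | nil => intro s; simp [pvG]
  | cons a t ih =>
    intro s
    match a with
    | [] => simp only [List.foldl_cons]; rw [ih]; simp only [pvG, List.map_cons, List.sum_cons, pvDelta, pvStart, pvEnd]; split_ifs <;> ring
    | [p] => simp only [List.foldl_cons]; rw [ih]; simp only [pvG, List.map_cons, List.sum_cons, pvDelta, pvStart, pvEnd]; split_ifs <;> ring
    | p :: r :: x :: xs => simp only [List.foldl_cons]; rw [ih]; simp only [pvG, List.map_cons, List.sum_cons, pvDelta, pvStart, pvEnd]; split_ifs <;> ring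
    | [p, r] =>
      simp only [List.foldl_cons]
      rw [ih]
      simp only [pvG, List.map_cons, List.sum_cons, pvDelta, pvStart, pvEnd]
      ring

-- ===== VERDICT (by name: the statement is the Claim_ definition above) =====
theorem brightestPosition_spec : Claim_equal_brightestPosition := by
  intro L _ hPre
  show brightestPosition L = brightestPosition_alt L
  have hdnd : (L.foldl pvStepA PySem.Dict.empty).keys.Nodup :=
    pv_dict_nodup L _ (by rw [PySem.Dict.keys_empty]; exact List.nodup_nil)
  have hdmem : ∀ c, c ∈ (L.foldl pvStepA PySem.Dict.empty).keys ↔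
      ∃ row ∈ L, c = pvStart row ∨ c = pvEnd row := by
    intro c
    rw [pv_dict_mem_keys L _ c hPre, PySem.Dict.keys_empty]
    simp
  have hBnd : (PySem.Set.union (PySem.Set.ofList (L.map pvStart))
      (PySem.Set.ofList (L.map pvEnd))).Nodup :=
    PySem.Set.nodup_union _ _ (PySem.Set.nodup_ofList _)
  have hBmem : ∀ c, c ∈ (PySem.Set.union (PySem.Set.ofList (L.map pvStart))
      (PySem.Set.ofList (L.map pvEnd))) ↔ ∃ row ∈ L, c = pvStart row ∨ c = pvEnd row := by
    intro c
    rw [PySem.Set.mem_union, PySem.Set.mem_ofList, PySem.Set.mem_ofList]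
    simp only [List.mem_map]
    constructor
    · rintro (⟨row, hrow, hc⟩ | ⟨row, hrow, hc⟩)
      · exact ⟨row, hrow, Or.inl hc.symm⟩
      · exact ⟨row, hrow, Or.inr hc.symm⟩
    · rintro ⟨row, hrow, hc | hc⟩
      · exact Or.inl ⟨row, hrow, hc.symm⟩
      · exact Or.inr ⟨row, hrow, hc.symm⟩
  have hperm : (L.foldl pvStepA PySem.Dict.empty).keys.Perm
      (PySem.Set.union (PySem.Set.ofList (L.map pvStart)) (PySem.Set.ofList (L.map pvEnd))) :=
    (List.perm_ext_iff_of_nodup hdnd hBnd).mpr (fun a => (hdmem a).trans (hBmem a).symm)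
  have hsorted_eq : PySem.List.sorted (L.foldl pvStepA PySem.Dict.empty).keys (fun x => x) false
      = PySem.List.sorted (PySem.Set.union (PySem.Set.ofList (L.map pvStart))
          (PySem.Set.ofList (L.map pvEnd))) (fun x => x) false :=
    PySem.List.sorted_eq_sorted_of_perm _ _ _ (fun a b h => h) hperm
  have hA : brightestPosition L =
      ((PySem.List.sorted (L.foldl pvStepA PySem.Dict.empty).keys (fun x => x) false).foldl
        (fun (st : Int × Int × Int) p =>
          let pre_sum := st.1 + (L.foldl pvStepA PySem.Dict.empty).getD p 0
          if pre_sum > st.2.2 then (pre_sum, p, pre_sum) else (pre_sum, st.2.1, st.2.2))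
        (0, 0, 0)).2.1 := rfl
  have hfun : (fun (st : Int × Int) c =>
      let b := L.foldl (fun (s : Int) row =>
        match row with
        | [p, r] => s + ((if p - r ≤ c then (1 : Int) else 0) - (if p + r + 1 ≤ c then (1 : Int) else 0))
        | _ => s) 0
      if b > st.1 then (b, c) else st)
      = (fun (st : Int × Int) c => if pvG L c > st.1 then (pvG L c, c) else st) := by
    funext st c
    have hb := pv_altBright L c 0
    simp only [hb, zero_add]
  have hB : brightestPosition_alt L =
      ((PySem.List.sorted (PySem.Set.union (PySem.Set.ofList (L.map pvStart))
          (PySem.Set.ofList (L.map pvEnd))) (fun x => x) false).foldl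
        (fun (st : Int × Int) c => if pvG L c > st.1 then (pvG L c, c) else st) (0, 0)).2 := by
    unfold brightestPosition_alt
    simp only [hfun]
    rfl
  rw [hA, hB, ← hsorted_eq]
  -- the two scans agree: the running prefix sum equals the recounted brightness
  have ksnd : (PySem.List.sorted (L.foldl pvStepA PySem.Dict.empty).keys (fun x => x) false).Nodup :=
    (PySem.List.sorted_perm _ _ _).nodup_iff.mpr hdnd
  have kspair : (PySem.List.sorted (L.foldl pvStepA PySem.Dict.empty).keys (fun x => x) false).Pairwise (· < ·) := by
    have hle := PySem.List.sorted_pairwise (L.foldl pvStepA PySem.Dict.empty).keys (fun x => x)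
    exact (hle.and ksnd).imp (fun h => lt_of_le_of_ne h.1 h.2)
  have ksmem : ∀ k, k ∈ PySem.List.sorted (L.foldl pvStepA PySem.Dict.empty).keys (fun x => x) false ↔
      ∃ row ∈ L, k = pvStart row ∨ k = pvEnd row := by
    intro k
    rw [PySem.List.mem_sorted]
    exact hdmem k
  apply pv_scan
  intro pre c post hsplit
  have hfilter := pv_filter_le _ pre post c kspair hsplit
  have hps := pv_prefix_sum L _ ksnd ksmem c
  rw [hfilter] at hps
  simp only [List.map_append, List.sum_append, List.map_cons, List.map_nil, List.sum_cons,
    List.sum_nil, add_zero] at hps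
  linarith
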